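-- pv_equiv track=rewrite | github.com/biopharmaai/Madrigal | novelddi/chemcpa/chemcpa_config_utils.py | invert_config
-- ===== SOURCE A (Python) =====
-- RESERVED_KEYS = ['grid', 'fixed', 'random']
--
-- def invert_config(config: dict):
--     reserved_sets = [(k, set(config.get(k, {}).keys())) for k in RESERVED_KEYS]
--     inverted_config = {}
--     for k, params in reserved_sets:
--         for p in params:
--             l = inverted_config.get(p, [])
--             l.append(k)
--             inverted_config[p] = l
--     return inverted_config
-- ===== SOURCE B (Python) =====
-- RESERVED_KEYS = ['grid', 'fixed', 'random']
--
-- def invert_config(config: dict):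
--     params = list(dict.fromkeys(p for k in RESERVED_KEYS for p in config.get(k, {}).keys()))
--     return {p: [k for k in RESERVED_KEYS if p in config.get(k, {})] for p in params}
-- ===== Notes on version B (the rewrite author's own statement) =====
-- stated objective: alternative
-- what changed: A accumulates the inverted dict by repeated get/append/insert over each reserved key's param set; B transposes the nesting: it first computes the ordered union of all parameter names, then builds each entry in one comprehension filtering the fixed RESERVED_KEYS list.
import Mathlib
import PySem

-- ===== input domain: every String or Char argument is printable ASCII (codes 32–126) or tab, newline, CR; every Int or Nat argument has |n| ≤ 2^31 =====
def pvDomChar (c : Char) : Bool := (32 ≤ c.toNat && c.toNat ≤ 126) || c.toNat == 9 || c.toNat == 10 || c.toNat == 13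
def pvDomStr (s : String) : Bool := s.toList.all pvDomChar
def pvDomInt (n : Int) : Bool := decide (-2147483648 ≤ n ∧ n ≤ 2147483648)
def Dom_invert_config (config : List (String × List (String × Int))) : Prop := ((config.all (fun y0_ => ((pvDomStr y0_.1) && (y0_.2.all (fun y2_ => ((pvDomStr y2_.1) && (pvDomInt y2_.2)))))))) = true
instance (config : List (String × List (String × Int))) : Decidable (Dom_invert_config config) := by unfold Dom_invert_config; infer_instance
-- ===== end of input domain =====

-- B replaces A's get/append/insert accumulation with a transposed build: the ordered union
-- of parameter names first, then one filter of the fixed reserved-key list per parameter.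
-- Python A's returned dict iterates params in hash order of the per-key sets; the ports fix
-- the deterministic first-appearance order (dict outputs are compared ignoring order).

-- config.get(k, {}).keys(), shared by both ports (A computes it once per key, B per use)
def pvKeysAt (config : List (String × List (String × Int))) (k : String) : List String :=
  ((PySem.Dict.mk config).getD k []).map Prod.fst

-- ===== PORT A =====
def invert_config (config : List (String × List (String × Int))) : List (String × List String) :=
  let reservedSets := ["grid", "fixed", "random"].map
    (fun k => (k, PySem.Set.ofList (pvKeysAt config k)))
  (reservedSets.foldl
    (fun inv kp => kp.2.foldl
      (fun inv p => inv.insert p ((inv.getD p []) ++ [kp.1])) inv)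
    (PySem.Dict.mk [])).items

-- ===== PORT B =====
def invert_config_alt (config : List (String × List (String × Int))) : List (String × List String) :=
  let params := PySem.List.dedup
    (["grid", "fixed", "random"].flatMap (fun k => pvKeysAt config k))
  params.map (fun p =>
    (p, ["grid", "fixed", "random"].filter (fun k => (pvKeysAt config k).contains p)))

-- ===== PRECONDITION & SPEC =====
def Spec_invert_config (config : List (String × List (String × Int))) (out : List (String × List String)) : Prop := out = invert_config_alt config
instance (config : List (String × List (String × Int))) (out : List (String × List String)) : Decidable (Spec_invert_config config out) := by unfold Spec_invert_config; infer_instance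

-- ===== CLAIM (what is proved, stated in full; the proofs are below) =====
def Claim_equal_invert_config : Prop := ∀ (config : List (String × List (String × Int))), Dom_invert_config config → Spec_invert_config config (invert_config config)

-- ===== LEMMAS AND PROOFS =====

-- getD after one of A's per-key insertion loops: the key k is appended exactly when p ∈ S
theorem pv_getD_fold (k : String) (S : List String) (hS : S.Nodup) :
    ∀ (d : PySem.Dict String (List String)) (p : String),
    (S.foldl (fun d q => d.insert q ((d.getD q []) ++ [k])) d).getD p []
      = d.getD p [] ++ (if p ∈ S then [k] else []) := by
  induction S with
  | nil => intro d p; simp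
  | cons q S ih =>
    intro d p
    simp only [List.foldl_cons]
    rw [ih (by exact hS.of_cons)]
    rw [PySem.Dict.getD_insert]
    by_cases hpq : p = q
    · subst hpq
      have hpS : p ∉ S := (List.nodup_cons.mp hS).1
      simp [hpS]
    · simp [hpq, List.mem_cons]

-- Set.update ignores deduplication of its second argument
theorem pv_update_ofList {s xs : List String} :
    PySem.Set.update s (PySem.Set.ofList xs) = PySem.Set.update s xs := by
  rw [PySem.Set.update_eq_append_filter, PySem.Set.update_eq_append_filter,
      PySem.Set.ofList_ofList]

-- ===== VERDICT (by name: the statement is the Claim_ definition above) =====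
theorem invert_config_spec : Claim_equal_invert_config := by
  intro config _
  unfold Spec_invert_config invert_config invert_config_alt
  simp only [List.map_cons, List.map_nil, List.foldl_cons, List.foldl_nil,
             List.flatMap_cons, List.flatMap_nil, List.append_nil]
  set g := pvKeysAt config "grid" with hg
  set f := pvKeysAt config "fixed" with hf
  set r := pvKeysAt config "random" with hr
  set G := PySem.Set.ofList g
  set F := PySem.Set.ofList f
  set R := PySem.Set.ofList r
  set step := fun (k : String) (d : PySem.Dict String (List String)) (S : List String) =>
    S.foldl (fun d q => d.insert q ((d.getD q []) ++ [k])) d with hstep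
  have hGnd : G.Nodup := PySem.Set.nodup_ofList g
  have hFnd : F.Nodup := PySem.Set.nodup_ofList f
  have hRnd : R.Nodup := PySem.Set.nodup_ofList r
  set d3 := step "random" (step "fixed" (step "grid" (PySem.Dict.mk []) G) F) R with hd3
  -- the keys of the final dict, via keys_foldl_insert three times
  have hkeys : d3.keys = PySem.Set.update (PySem.Set.update G f) r := by
    rw [hd3, hstep]
    simp only []
    rw [PySem.Dict.keys_foldl_insert, PySem.Dict.keys_foldl_insert,
        PySem.Dict.keys_foldl_insert]
    have h0 : (PySem.Dict.mk ([] : List (String × List String))).keys = [] := by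
      simp [PySem.Dict.keys]
    rw [h0, PySem.Set.update_nil_left, PySem.Set.ofList_ofList]
    rw [show PySem.Set.update (PySem.Set.update (PySem.Set.ofList g) F) R
          = PySem.Set.update (PySem.Set.update (PySem.Set.ofList g) f) r by
        rw [pv_update_ofList, pv_update_ofList]]
  have hknd : d3.keys.Nodup := by
    rw [hkeys]
    exact PySem.Set.nodup_update _ _ (PySem.Set.nodup_update _ _ (PySem.Set.nodup_ofList g))
  -- params on the B side is the same list
  have hparams : PySem.List.dedup (g ++ f ++ r) = d3.keys := by
    rw [hkeys, PySem.List.dedup_eq_ofList, PySem.Set.ofList_append, PySem.Set.ofList_append]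
  -- each stored value is the filtered reserved-key list
  have hval : ∀ p, d3.getD p []
      = ["grid", "fixed", "random"].filter (fun k => (pvKeysAt config k).contains p) := by
    intro p
    rw [hd3, hstep]
    simp only []
    rw [pv_getD_fold _ R hRnd, pv_getD_fold _ F hFnd, pv_getD_fold _ G hGnd]
    have h0 : (PySem.Dict.mk ([] : List (String × List String))).getD p [] = [] := by
      simp [PySem.Dict.getD, PySem.Dict.get?]
    rw [h0]
    have hgm : (p ∈ G) ↔ (p ∈ g) := PySem.Set.mem_ofList _ _
    have hfm : (p ∈ F) ↔ (p ∈ f) := PySem.Set.mem_ofList _ _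
    have hrm : (p ∈ R) ↔ (p ∈ r) := PySem.Set.mem_ofList _ _
    by_cases h1 : p ∈ g <;> by_cases h2 : p ∈ f <;> by_cases h3 : p ∈ r <;>
      simp [List.filter, hgm, hfm, hrm, h1, h2, h3, ← hg, ← hf, ← hr]
  -- assemble: A's items are keys paired with stored values
  rw [PySem.Dict.items_eq_map_keys d3 hknd []]
  have hparams' : PySem.List.dedup (g ++ (f ++ r)) = d3.keys := by
    rw [← List.append_assoc]; exact hparams
  rw [hparams']
  exact List.map_congr_left (fun p _ => by rw [hval p])
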